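-- pv_equiv track=rewrite | github.com/reframe-biker/mahousing | pipeline/ingest/census_acs.py | _strip_suffix
-- ===== SOURCE A (Python) =====
-- def _strip_suffix(name: str) -> str:
--     """Remove Census geographic suffixes to get clean municipality names.
--
--     'Cambridge city' → 'Cambridge'
--     'Brookline town' → 'Brookline'
--     'Gosnold town'   → 'Gosnold'
--     """
--     suffixes = (
--         " town", " city", " plantation", " grant", " purchase",
--         " gore", " district", " location",
--     )
--     lower = name.lower()
--     for suffix in suffixes:
--         if lower.endswith(suffix):
--             return name[: -len(suffix)].strip()
--     return name.strip()
-- ===== SOURCE B (Python) =====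
-- _SUFFIX_WORDS = frozenset(
--     {"town", "city", "plantation", "grant", "purchase",
--      "gore", "district", "location"}
-- )
--
--
-- def _strip_suffix(name: str) -> str:
--     """Remove Census geographic suffixes to get clean municipality names."""
--     i = name.rfind(" ")
--     if i >= 0 and name[i + 1:].lower() in _SUFFIX_WORDS:
--         return name[:i].strip()
--     return name.strip()
-- ===== Notes on version B (the rewrite author's own statement) =====
-- stated objective: idiomatic
-- what changed: Replaces the eight-way endswith loop by a single split at the last space (str.rfind) plus one frozenset membership test on the lowercased final word.
import Mathlib
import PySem

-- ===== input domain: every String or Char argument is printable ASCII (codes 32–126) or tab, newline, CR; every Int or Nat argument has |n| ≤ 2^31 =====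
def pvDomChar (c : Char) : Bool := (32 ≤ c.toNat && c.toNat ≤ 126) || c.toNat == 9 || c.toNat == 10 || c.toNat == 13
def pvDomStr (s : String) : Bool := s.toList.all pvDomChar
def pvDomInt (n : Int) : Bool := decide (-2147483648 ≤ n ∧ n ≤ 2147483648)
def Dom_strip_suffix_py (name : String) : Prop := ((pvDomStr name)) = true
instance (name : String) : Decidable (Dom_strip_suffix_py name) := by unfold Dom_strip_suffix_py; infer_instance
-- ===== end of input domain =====

-- B replaces A's eight-way endswith loop by one split at the last space plus a set membership
-- test on the lowercased final word (objective: idiomatic; same return value everywhere).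

-- ===== PORT A =====
def pySuffixes : List String :=
  [" town", " city", " plantation", " grant", " purchase", " gore", " district", " location"]

def stripSuffixGo (name lowerName : String) : List String → String
  | [] => PySem.Str.strip name
  | suffix :: rest =>
      if PySem.Str.endswith lowerName suffix then
        PySem.Str.strip (PySem.Str.slice name none (some (-(PySem.Str.len suffix))))
      else stripSuffixGo name lowerName rest

def strip_suffix_py (name : String) : String :=
  stripSuffixGo name (PySem.Str.lower name) pySuffixes

-- ===== PORT B =====
def suffixWords : PySem.Set String :=
  PySem.Set.ofList ["town", "city", "plantation", "grant", "purchase", "gore", "district", "location"]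

def strip_suffix_py_alt (name : String) : String :=
  let i := PySem.Str.rfind name " "
  if 0 ≤ i ∧ PySem.Set.contains suffixWords
      (PySem.Str.lower (PySem.Str.slice name (some (i + 1)) none)) = true then
    PySem.Str.strip (PySem.Str.slice name none (some i))
  else
    PySem.Str.strip name

-- ===== PRECONDITION & SPEC =====
def Spec_strip_suffix_py (name : String) (out : String) : Prop := out = strip_suffix_py_alt name
instance (name : String) (out : String) : Decidable (Spec_strip_suffix_py name out) := by unfold Spec_strip_suffix_py; infer_instance

-- ===== CLAIM (what is proved, stated in full; the proofs are below) =====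
def Claim_equal_strip_suffix_py : Prop := ∀ (name : String), Dom_strip_suffix_py name → Spec_strip_suffix_py name (strip_suffix_py name)

-- ===== LEMMAS AND PROOFS =====

lemma lowerChar_space (c : Char) : PySem.Chars.lowerChar c = ' ' ↔ c = ' ' := by
  unfold PySem.Chars.lowerChar PySem.Chars.isupper
  split_ifs with h
  · simp only [Bool.and_eq_true, decide_eq_true_eq] at h
    obtain ⟨h1, h2⟩ := h
    have h1' : 65 ≤ c.toNat := h1
    have h2' : c.toNat ≤ 90 := h2
    constructor
    · intro he
      have hv : (c.toNat + 32).isValidChar := Or.inl (by omega)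
      have h32 : (32 : Nat) = c.toNat + 32 := by
        have := Char.toNat_ofNat (c.toNat + 32)
        rw [if_pos hv] at this
        rw [he] at this
        exact this
      omega
    · intro he
      subst he
      exact absurd h1' (by decide)
  · exact Iff.rfl

lemma mem_space_lower (l : List Char) : ' ' ∈ PySem.Chars.lower l ↔ ' ' ∈ l := by
  simp [PySem.Chars.lower, List.mem_map, lowerChar_space]

lemma lower_append_space (p t : List Char) :
    PySem.Chars.lower (p ++ ' ' :: t) = PySem.Chars.lower p ++ ' ' :: PySem.Chars.lower t := by
  simp [PySem.Chars.lower]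
  exact (lowerChar_space ' ').mpr rfl

lemma isPrefixOf_space_false (m : List Char) (h : ' ' ∉ m) : [' '].isPrefixOf m = false := by
  cases m with
  | nil => rfl
  | cons a m' =>
      have hne : ¬ (' ' = a) := fun hc => h (by simp [← hc])
      simp [List.isPrefixOf, hne]

lemma go_zero (s sub : List Char) :
    PySem.Chars.rfind.go s sub 0 = if sub.isPrefixOf s then 0 else -1 := rfl

lemma go_succ (s sub : List Char) (j : Nat) :
    PySem.Chars.rfind.go s sub (j + 1) =
      if sub.isPrefixOf (s.drop (j + 1)) then ((j : Int) + 1) else PySem.Chars.rfind.go s sub j := rfl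

lemma go_none (s : List Char) (hs : ' ' ∉ s) (j : Nat) : PySem.Chars.rfind.go s [' '] j = -1 := by
  induction j with
  | zero => rw [go_zero, isPrefixOf_space_false s hs]; rfl
  | succ j ih =>
      rw [go_succ, isPrefixOf_space_false _ (fun hm => hs (List.mem_of_mem_drop hm))]
      simpa using ih

lemma rfind_no_space (s : List Char) (hs : ' ' ∉ s) : PySem.Chars.rfind s [' '] = -1 :=
  go_none s hs s.length

lemma go_last (p t : List Char) (ht : ' ' ∉ t) :
    ∀ j, p.length ≤ j → PySem.Chars.rfind.go (p ++ ' ' :: t) [' '] j = (p.length : Int) := by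
  intro j
  induction j with
  | zero =>
      intro hp
      have hp0 : p = [] := List.eq_nil_of_length_eq_zero (Nat.le_zero.mp hp)
      subst hp0
      rw [go_zero]
      simp [List.isPrefixOf]
  | succ j ih =>
      intro hp
      rw [go_succ]
      by_cases he : p.length = j + 1
      · have : (p ++ ' ' :: t).drop (j + 1) = ' ' :: t := by
          rw [← he]
          simp
        rw [this]
        simp [List.isPrefixOf, he]
      · have hle : p.length ≤ j := by omega
        have hdrop : (p ++ ' ' :: t).drop (j + 1) = t.drop (j - p.length) := by
          have : p ++ ' ' :: t = (p ++ [' ']) ++ t := by simp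
          rw [this]
          have hlen : j + 1 = (p ++ [' ']).length + (j - p.length) := by
            simp; omega
          rw [hlen, List.drop_append]
          have h1 : List.drop ((p ++ [' ']).length + (j - p.length)) (p ++ [' ']) = [] :=
            List.drop_eq_nil_of_le (by omega)
          rw [h1, List.nil_append, Nat.add_sub_cancel_left]
        rw [hdrop, isPrefixOf_space_false _ (fun hm => ht (List.mem_of_mem_drop hm))]
        simpa using ih hle

lemma rfind_last (p t : List Char) (ht : ' ' ∉ t) :
    PySem.Chars.rfind (p ++ ' ' :: t) [' '] = (p.length : Int) :=
  go_last p t ht _ (by simp)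

lemma exists_last_space (l : List Char) (h : ' ' ∈ l) :
    ∃ p t, l = p ++ ' ' :: t ∧ ' ' ∉ t := by
  induction l using List.reverseRecOn with
  | nil => simp at h
  | append_singleton xs x ih =>
      by_cases hx : x = ' '
      · exact ⟨xs, [], by simp [hx], by simp⟩
      · have hm : ' ' ∈ xs := by
          rcases List.mem_append.mp h with h1 | h1
          · exact h1
          · simp at h1; exact absurd h1.symm hx
        obtain ⟨p, t, rfl, ht⟩ := ih hm
        refine ⟨p, t ++ [x], by simp, ?_⟩
        intro hc
        rcases List.mem_append.mp hc with h1 | h1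
        · exact ht h1
        · simp at h1; exact hx h1.symm

lemma suffix_space_iff (w p t : List Char) (hw : ' ' ∉ w) (ht : ' ' ∉ t) :
    (' ' :: w <:+ p ++ ' ' :: t) ↔ w = t := by
  constructor
  · intro h
    have h2 : (' ' :: t) <:+ p ++ ' ' :: t := List.suffix_append p (' ' :: t)
    rcases List.suffix_or_suffix_of_suffix h h2 with h3 | h3
    · rcases h3 with ⟨u, hu⟩
      cases u with
      | nil => simpa using hu
      | cons a u' =>
          exfalso
          have h4 : u' ++ ' ' :: w = t := by
            simpa using congrArg List.tail hu
          have hmem : (' ' : Char) ∈ u' ++ ' ' :: w := by simp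
          rw [h4] at hmem
          exact ht hmem
    · rcases h3 with ⟨u, hu⟩
      cases u with
      | nil => simpa using hu.symm
      | cons a u' =>
          exfalso
          have h4 : u' ++ ' ' :: t = w := by
            simpa using congrArg List.tail hu
          have hmem : (' ' : Char) ∈ u' ++ ' ' :: t := by simp
          rw [h4] at hmem
          exact hw hmem
  · rintro rfl
    exact List.suffix_append _ _

-- endswith characterisation, given the last-space decomposition of the name
lemma endswith_lower_iff (l p t w : List Char) (hl : l = p ++ ' ' :: t) (ht : ' ' ∉ t) (hw : ' ' ∉ w) :
    PySem.Chars.endswith (PySem.Chars.lower l) (' ' :: w) = true ↔ w = PySem.Chars.lower t := by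
  rw [hl, lower_append_space, PySem.Chars.endswith_iff]
  exact suffix_space_iff w _ _ hw (fun hm => ht ((mem_space_lower t).mp hm))

lemma endswith_space_false (l w : List Char) (hl : ' ' ∉ l) (hw : ' ' ∈ w) :
    PySem.Chars.endswith (PySem.Chars.lower l) w = false := by
  rw [Bool.eq_false_iff]
  intro hc
  have hsfx := (PySem.Chars.endswith_iff _ _).mp hc
  exact hl ((mem_space_lower l).mp (hsfx.subset hw))

lemma stripSuffixGo_loop (name : String) (p t : List Char)
    (hl : name.toList = p ++ ' ' :: t) (ht : ' ' ∉ t) (sufs : List String)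
    (hs : ∀ s ∈ sufs, ∃ w, s.toList = ' ' :: w ∧ ' ' ∉ w) :
    stripSuffixGo name (PySem.Str.lower name) sufs =
      if sufs.any (fun s => s.toList.tail == PySem.Chars.lower t) then
        String.ofList (PySem.Chars.strip p)
      else String.ofList (PySem.Chars.strip name.toList) := by
  induction sufs with
  | nil => simp [stripSuffixGo, PySem.Str.strip]
  | cons s rest ih =>
      obtain ⟨w, hsw, hw⟩ := hs s (List.mem_cons_self)
      have hcond : PySem.Str.endswith (PySem.Str.lower name) s =
          (PySem.Chars.endswith (PySem.Chars.lower name.toList) (' ' :: w)) := by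
        simp [PySem.Str.endswith, hsw]
      rw [stripSuffixGo, List.any_cons]
      by_cases hm : PySem.Chars.lower t = w
      · have : PySem.Str.endswith (PySem.Str.lower name) s = true := by
          rw [hcond]
          exact (endswith_lower_iff _ p t w hl ht hw).mpr hm.symm
        rw [if_pos this]
        have htl : (s.toList.tail == PySem.Chars.lower t) = true := by
          simp [hsw, hm]
        rw [htl, Bool.true_or, if_pos rfl]
        -- output: name[: -len s] .strip() = strip p
        have hlen : PySem.Str.len s = ((w.length + 1 : Nat) : Int) := by
          simp [PySem.Str.len, hsw]
        have htlen : t.length = w.length := by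
          rw [← hm]; simp [PySem.Chars.lower]
        have hslice : PySem.Str.slice name none (some (-(PySem.Str.len s))) = String.ofList p := by
          simp only [PySem.Str.slice, hlen]
          congr 1
          rw [PySem.Chars.slice_eq_listSlice]
          rw [PySem.List.slice_to_neg_natCast _ _ (by omega)]
          rw [hl]
          have hplen : (p ++ ' ' :: t).length - (w.length + 1) = p.length := by
            simp [htlen]
          rw [hplen, List.take_left]
        rw [hslice]
        simp [PySem.Str.strip, String.toList_ofList]
      · have : PySem.Str.endswith (PySem.Str.lower name) s = false := by
          rw [hcond, Bool.eq_false_iff]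
          intro hc
          exact hm (((endswith_lower_iff _ p t w hl ht hw).mp hc).symm)
        rw [if_neg (by rw [this]; simp)]
        have htl : (s.toList.tail == PySem.Chars.lower t) = false := by
          simp [hsw]
          exact fun hc => hm hc.symm
        rw [htl, Bool.false_or]
        exact ih (fun s' hs' => hs s' (List.mem_cons_of_mem _ hs'))

lemma stripSuffixGo_nomatch (name lo : String) (sufs : List String)
    (h : ∀ s ∈ sufs, PySem.Str.endswith lo s = false) :
    stripSuffixGo name lo sufs = PySem.Str.strip name := by
  induction sufs with
  | nil => rfl
  | cons s rest ih =>
      have hf : ¬ (PySem.Str.endswith lo s = true) := by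
        rw [h s (List.mem_cons_self)]; simp
      rw [stripSuffixGo, if_neg hf]
      exact ih (fun s' hs' => h s' (List.mem_cons_of_mem _ hs'))

-- ===== VERDICT (by name: the statement is the Claim_ definition above) =====
set_option maxHeartbeats 1000000 in
theorem strip_suffix_py_spec : Claim_equal_strip_suffix_py := by
  intro name _
  unfold Spec_strip_suffix_py strip_suffix_py strip_suffix_py_alt
  by_cases hsp : ' ' ∈ name.toList
  · obtain ⟨p, t, hl, ht⟩ := exists_last_space _ hsp
    have hr : PySem.Str.rfind name " " = (p.length : Int) := by
      have : (" ".toList) = [' '] := rfl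
      rw [PySem.Str.rfind, this, hl]
      exact rfind_last p t ht
    have htail : (PySem.Str.lower (PySem.Str.slice name (some ((p.length : Int) + 1)) none)).toList
        = PySem.Chars.lower t := by
      rw [PySem.Str.toList_lower]
      apply congrArg
      simp only [PySem.Str.slice]
      rw [String.toList_ofList, PySem.Chars.slice_eq_listSlice]
      have hc : ((p.length : Int) + 1) = ((p.length + 1 : Nat) : Int) := by push_cast; ring
      rw [hc, PySem.List.slice_from_natCast, hl]
      have : p ++ ' ' :: t = (p ++ [' ']) ++ t := by simp
      rw [this]
      have hlen : p.length + 1 = (p ++ [' ']).length := by simp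
      rw [hlen, List.drop_left]
    rw [stripSuffixGo_loop name p t hl ht pySuffixes (by
      intro s hs
      simp only [pySuffixes, List.mem_cons, List.not_mem_nil, or_false] at hs
      rcases hs with rfl | rfl | rfl | rfl | rfl | rfl | rfl | rfl
      · exact ⟨"town".toList, rfl, by decide⟩
      · exact ⟨"city".toList, rfl, by decide⟩
      · exact ⟨"plantation".toList, rfl, by decide⟩
      · exact ⟨"grant".toList, rfl, by decide⟩
      · exact ⟨"purchase".toList, rfl, by decide⟩
      · exact ⟨"gore".toList, rfl, by decide⟩
      · exact ⟨"district".toList, rfl, by decide⟩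
      · exact ⟨"location".toList, rfl, by decide⟩)]
    simp only [hr]
    -- both sides are ifs; the conditions agree, then the branches agree
    have hbeq : ∀ s : String,
        ((PySem.Str.lower (PySem.Str.slice name (some ((p.length : Int) + 1)) none)) == s) =
          (s.toList == PySem.Chars.lower t) := by
      intro s
      by_cases hx : s.toList = PySem.Chars.lower t
      · have he : PySem.Str.lower (PySem.Str.slice name (some ((p.length : Int) + 1)) none) = s :=
          String.toList_inj.mp (by rw [htail, hx])
      
        simp [he, hx]
      · have he : PySem.Str.lower (PySem.Str.slice name (some ((p.length : Int) + 1)) none) ≠ s :=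
          fun he => hx (by rw [← he, htail])
        simp [he, hx]
    have hcond : (pySuffixes.any (fun s => s.toList.tail == PySem.Chars.lower t)) =
        (PySem.Set.contains suffixWords
          (PySem.Str.lower (PySem.Str.slice name (some ((p.length : Int) + 1)) none))) := by
      have hset : suffixWords =
          ["town", "city", "plantation", "grant", "purchase", "gore", "district", "location"] := rfl
      rw [PySem.Set.contains, hset, List.contains_eq_any_beq]
      simp only [pySuffixes, List.any_cons, List.any_nil]
      rw [hbeq, hbeq, hbeq, hbeq, hbeq, hbeq, hbeq, hbeq]
      rfl
    have h0 : (0 : Int) ≤ (p.length : Int) := by positivity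
    by_cases hb : PySem.Set.contains suffixWords
        (PySem.Str.lower (PySem.Str.slice name (some ((p.length : Int) + 1)) none)) = true
    · rw [if_pos (hcond ▸ hb), if_pos ⟨h0, hb⟩]
      have hsl : PySem.Str.slice name none (some (p.length : Int)) = String.ofList p := by
        simp only [PySem.Str.slice]
        apply congrArg
        rw [PySem.Chars.slice_eq_listSlice, PySem.List.slice_to_natCast, hl, List.take_left]
      rw [hsl]
      simp [PySem.Str.strip, String.toList_ofList]
    · rw [if_neg (by rw [hcond]; exact hb), if_neg (fun hc => hb hc.2)]
      simp [PySem.Str.strip]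
  · have hr : PySem.Str.rfind name " " = -1 := by
      have : (" ".toList) = [' '] := rfl
      rw [PySem.Str.rfind, this]
      exact rfind_no_space _ hsp
    rw [stripSuffixGo_nomatch name _ pySuffixes (by
      intro s hs
      have hsl : PySem.Str.endswith (PySem.Str.lower name) s =
          PySem.Chars.endswith (PySem.Chars.lower name.toList) s.toList := by
        simp [PySem.Str.endswith]
      rw [hsl]
      simp only [pySuffixes, List.mem_cons, List.not_mem_nil, or_false] at hs
      rcases hs with rfl | rfl | rfl | rfl | rfl | rfl | rfl | rfl
      · exact endswith_space_false _ _ hsp (by decide)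
      · exact endswith_space_false _ _ hsp (by decide)
      · exact endswith_space_false _ _ hsp (by decide)
      · exact endswith_space_false _ _ hsp (by decide)
      · exact endswith_space_false _ _ hsp (by decide)
      · exact endswith_space_false _ _ hsp (by decide)
      · exact endswith_space_false _ _ hsp (by decide)
      · exact endswith_space_false _ _ hsp (by decide))]
    simp only [hr]
    rw [if_neg (by simp)]
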